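-- pv_equiv track=rewrite | github.com/inon-peled/advent_of_code | y2017/d12/part1.py | solve
-- ===== SOURCE A (Python) =====
-- from collections import deque
--
-- def solve(g):
--     s = {0}
--     q = deque(g[0])
--     while q:
--         p = q.popleft()
--         if p not in s:
--             s.add(p)
--             q.extend(g[p])
--     answer = len(s)
--     return answer
-- ===== SOURCE B (Python) =====
-- def solve(g):
--     seen = {0}
--     frontier = [0]
--     while frontier:
--         nxt = []
--         for node in frontier:
--             for n in g[node]:
--                 if n not in seen:
--                     seen.add(n)
--                     nxt.append(n)
--         frontier = nxt
--     return len(seen)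
-- ===== Notes on version B (the rewrite author's own statement) =====
-- stated objective: alternative
-- what changed: Queue-based BFS (deque of pending nodes, popped one at a time with the visited test at pop time) is replaced by level-synchronous frontier BFS (visited test at enqueue time, whole levels expanded per round; no deque).
import Mathlib
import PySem

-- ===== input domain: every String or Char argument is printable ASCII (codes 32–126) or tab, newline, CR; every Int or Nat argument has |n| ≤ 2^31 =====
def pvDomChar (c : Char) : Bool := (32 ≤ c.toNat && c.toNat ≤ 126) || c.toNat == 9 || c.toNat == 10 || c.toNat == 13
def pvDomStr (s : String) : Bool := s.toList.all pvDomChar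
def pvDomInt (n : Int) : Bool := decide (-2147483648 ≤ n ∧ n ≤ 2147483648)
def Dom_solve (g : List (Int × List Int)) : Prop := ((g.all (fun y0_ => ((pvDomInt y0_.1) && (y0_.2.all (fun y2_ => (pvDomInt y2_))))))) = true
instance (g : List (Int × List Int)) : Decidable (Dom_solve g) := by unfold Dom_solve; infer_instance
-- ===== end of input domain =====

-- B replaces A's deque-based BFS (visited test at pop time) by level-synchronous frontier BFS
-- (visited test at enqueue time); same exact result, no speed claim.

-- ===== PORT A =====
-- termination fuel for A's while loop: enough for the loop to drain (proved below); the fuel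
-- guard only makes the same computation total, it never changes the computed value
def fuelA (g : List (Int × List Int)) : Nat :=
  ((PySem.Dict.get? (PySem.Dict.mk g) 0).getD []).length
    + (g.map (fun kv => 1 + kv.2.length)).sum + 1

-- the while loop of A: s is the Python set `s`, q the deque; none = KeyError (or fuel out, unreachable)
def loopA (g : List (Int × List Int)) : Nat → PySem.Set Int → List Int → Option (PySem.Set Int)
  | 0, _, _ => none
  | fuel+1, s, q =>
    match q with
    | [] => some s
    | p :: q' =>
      if p ∈ s then loopA g fuel s q'
      else
        match PySem.Dict.get? (PySem.Dict.mk g) p with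
        | none => none                                   -- Python: KeyError on g[p]
        | some ns => loopA g fuel (PySem.Set.add s p) (q' ++ ns)

def solve (g : List (Int × List Int)) : Int :=
  match PySem.Dict.get? (PySem.Dict.mk g) 0 with
  | none => 0                                            -- Python: KeyError on g[0]; excluded by Pre_
  | some q0 =>
    match loopA g (fuelA g) (PySem.Set.ofList [0]) q0 with
    | none => 0                                          -- KeyError inside the loop; excluded by Pre_
    | some s => (s.length : Int)                         -- answer = len(s)

-- ===== PORT B =====
-- inner 'for n in g[node]: if n not in seen: seen.add(n); nxt.append(n)'
def addNew (seen : PySem.Set Int) (nxt : List Int) : List Int → PySem.Set Int × List Int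
  | [] => (seen, nxt)
  | n :: ns =>
    if n ∈ seen then addNew seen nxt ns
    else addNew (PySem.Set.add seen n) (nxt ++ [n]) ns

-- 'for node in frontier: …'; none = KeyError on g[node]
def expand (g : List (Int × List Int)) (seen : PySem.Set Int) (nxt : List Int) :
    List Int → Option (PySem.Set Int × List Int)
  | [] => some (seen, nxt)
  | node :: rest =>
    match PySem.Dict.get? (PySem.Dict.mk g) node with
    | none => none
    | some ns =>
      match addNew seen nxt ns with
      | (seen', nxt') => expand g seen' nxt' rest

def fuelB (g : List (Int × List Int)) : Nat := (PySem.List.dedup (g.map Prod.fst)).length + 2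

-- the while loop of B
def loopB (g : List (Int × List Int)) : Nat → PySem.Set Int → List Int → Option (PySem.Set Int)
  | 0, _, _ => none
  | fuel+1, seen, frontier =>
    if frontier = [] then some seen
    else
      match expand g seen [] frontier with
      | none => none
      | some (seen', nxt) => loopB g fuel seen' nxt

def solve_alt (g : List (Int × List Int)) : Int :=
  match loopB g (fuelB g) (PySem.Set.ofList [0]) [0] with
  | none => 0                                            -- KeyError; excluded by Pre_
  | some seen => (seen.length : Int)

-- ===== PRECONDITION & SPEC =====
-- Pre_solve: some subset of g's keys contains 0 and is closed under the neighbour lists — i.e.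
-- every node BFS can reach from 0 is a key of g. This is EXACTLY the set of inputs on which the
-- Python A returns (otherwise g[p] raises KeyError for some reached p); nothing else is excluded.
def Pre_solve (g : List (Int × List Int)) : Prop :=
  ∃ S, S ∈ (g.map Prod.fst).sublists ∧ 0 ∈ S ∧
    ∀ x ∈ S, ∀ n ∈ (PySem.Dict.get? (PySem.Dict.mk g) x).getD [], n ∈ S
instance (g : List (Int × List Int)) : Decidable (Pre_solve g) := by unfold Pre_solve; infer_instance

def pvWitness_solve : (List (Int × List Int)) := [(0, [1, 1]), (1, [0]), (5, [7])]

def Spec_solve (g : List (Int × List Int)) (out : Int) : Prop := out = solve_alt g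
instance (g : List (Int × List Int)) (out : Int) : Decidable (Spec_solve g out) := by unfold Spec_solve; infer_instance

-- ===== CLAIM (what is proved, stated in full; the proofs are below) =====
def Claim_equal_solve : Prop := ∀ (g : List (Int × List Int)), Dom_solve g → Pre_solve g → Spec_solve g (solve g)

-- ===== LEMMAS AND PROOFS =====

-- neighbours of p, defaulting to [] when p is not a key
def nbrsD (g : List (Int × List Int)) (p : Int) : List Int :=
  (PySem.Dict.get? (PySem.Dict.mk g) p).getD []

-- nodes reachable from 0
inductive Reaches (g : List (Int × List Int)) : Int → Prop
  | zero : Reaches g 0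
  | step (p n : Int) : Reaches g p → n ∈ nbrsD g p → Reaches g n

-- a certificate set as in Pre_solve
def GoodSet (g : List (Int × List Int)) (S : List Int) : Prop :=
  (∀ x ∈ S, x ∈ g.map Prod.fst) ∧ 0 ∈ S ∧ ∀ x ∈ S, ∀ n ∈ nbrsD g x, n ∈ S

theorem pre_goodSet {g : List (Int × List Int)} (h : Pre_solve g) : ∃ S, GoodSet g S := by
  obtain ⟨S, hsub, h0, hcl⟩ := h
  exact ⟨S, fun x hx => (List.mem_sublists.mp hsub).subset hx, h0, hcl⟩

theorem key_get?_some {g : List (Int × List Int)} {k : Int} (h : k ∈ g.map Prod.fst) :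
    ∃ ns, PySem.Dict.get? (PySem.Dict.mk g) k = some ns := by
  have h2 := PySem.Dict.contains_iff_mem_keys (d := PySem.Dict.mk g) (k := k)
  rw [PySem.Dict.contains_eq_isSome_get?] at h2
  rw [show (PySem.Dict.mk g).keys = g.map Prod.fst from rfl] at h2
  exact Option.isSome_iff_exists.mp (h2.mpr h)

theorem goodSet_get?_some {g : List (Int × List Int)} {S : List Int} (hS : GoodSet g S)
    {x : Int} (hx : x ∈ S) : PySem.Dict.get? (PySem.Dict.mk g) x = some (nbrsD g x) := by
  obtain ⟨ns, hns⟩ := key_get?_some (hS.1 x hx)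
  rw [hns]; simp [nbrsD, hns]

-- a set containing 0 and closed under nbrsD contains every reachable node
theorem reaches_mem_closed {g : List (Int × List Int)} {t : List Int}
    (h0 : 0 ∈ t) (hcl : ∀ x ∈ t, ∀ n ∈ nbrsD g x, n ∈ t) {x : Int} (h : Reaches g x) : x ∈ t := by
  induction h with
  | zero => exact h0
  | step p n _ hn ih => exact hcl p ih n hn

-- ---- termination measure for A ----
def muA (g : List (Int × List Int)) (s : PySem.Set Int) (q : List Int) : Nat :=
  q.length + ((g.filter (fun kv => decide (kv.1 ∉ s))).map (fun kv => 1 + kv.2.length)).sum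

theorem sum_filter_le (g : List (Int × List Int)) (p q : Int × List Int → Bool)
    (h : ∀ kv, p kv → q kv) :
    ((g.filter p).map (fun kv => 1 + kv.2.length)).sum
      ≤ ((g.filter q).map (fun kv => 1 + kv.2.length)).sum :=
  List.Sublist.sum_le_sum ((List.monotone_filter_right g h).map _) (by simp)

-- popping an unseen keyed node strictly shrinks muA
theorem muA_step {g : List (Int × List Int)} {s : PySem.Set Int} {p : Int} {ns : List Int}
    (hget : PySem.Dict.get? (PySem.Dict.mk g) p = some ns) (hp : p ∉ s) (q' : List Int) :
    muA g (PySem.Set.add s p) (q' ++ ns) < muA g s (p :: q') := by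
  have key : ((g.filter (fun kv => decide (kv.1 ∉ PySem.Set.add s p))).map (fun kv => 1 + kv.2.length)).sum
      + (1 + ns.length)
      ≤ ((g.filter (fun kv => decide (kv.1 ∉ s))).map (fun kv => 1 + kv.2.length)).sum := by
    clear q'
    induction g with
    | nil => simp [PySem.Dict.get?] at hget
    | cons kv rest ih =>
      rw [PySem.Dict.get?_mk_cons] at hget
      by_cases hk : kv.1 = p
      · have hget' : ns = kv.2 := by
          rw [if_pos (show (kv.1 == p) = true by simp [hk])] at hget
          exact (Option.some.inj hget).symm
        have h1 : kv.1 ∉ s := hk ▸ hp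
        have h2 : kv.1 ∈ PySem.Set.add s p := (PySem.Set.mem_add _ _ _).mpr (Or.inr hk)
        rw [List.filter_cons_of_neg (by simp [h2]), List.filter_cons_of_pos (by simp [h1])]
        simp only [List.map_cons, List.sum_cons]
        have hsub := sum_filter_le rest (fun kv => decide (kv.1 ∉ PySem.Set.add s p))
          (fun kv => decide (kv.1 ∉ s))
          (by intro kv h
              simp only [decide_eq_true_eq] at *
              exact fun hm => h ((PySem.Set.mem_add _ _ _).mpr (Or.inl hm)))
        have hlen : ns.length = kv.2.length := by rw [hget']
        omega
      · have hget2 : PySem.Dict.get? (PySem.Dict.mk rest) p = some ns := by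
          rw [if_neg (show ¬(kv.1 == p) = true by simp [hk])] at hget
          exact hget
        have hmem : kv.1 ∈ PySem.Set.add s p ↔ kv.1 ∈ s := by
          rw [PySem.Set.mem_add]
          constructor
          · rintro (h | h)
            · exact h
            · exact absurd h hk
          · exact Or.inl
        by_cases hin : kv.1 ∈ s
        · rw [List.filter_cons_of_neg (by simp [hmem.mpr hin]),
            List.filter_cons_of_neg (by simp [hin])]
          exact ih hget2
        · rw [List.filter_cons_of_pos (by simp [hin, hmem]),
            List.filter_cons_of_pos (by simp [hin])]
          simp only [List.map_cons, List.sum_cons]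
          have := ih hget2
          omega
  simp only [muA, List.length_append, List.length_cons]
  omega

-- ---- main loop lemma for A ----
theorem loopA_run {g : List (Int × List Int)} {S : List Int} (hS : GoodSet g S) :
    ∀ (fuel : Nat) (s : PySem.Set Int) (q : List Int),
    muA g s q < fuel →
    s.Nodup → 0 ∈ s →
    (∀ x ∈ s, Reaches g x ∧ x ∈ S) →
    (∀ x ∈ q, Reaches g x ∧ x ∈ S) →
    (∀ x ∈ s, ∀ n ∈ nbrsD g x, n ∈ s ∨ n ∈ q) →
    ∃ t, loopA g fuel s q = some t ∧ t.Nodup ∧ ∀ x, x ∈ t ↔ Reaches g x := by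
  intro fuel
  induction fuel with
  | zero => intro s q hmu; omega
  | succ fuel ih =>
    intro s q hmu hnd h0 hs hq hcl
    match q with
    | [] =>
      refine ⟨s, rfl, hnd, fun x => ⟨fun hx => (hs x hx).1, fun hr => ?_⟩⟩
      exact reaches_mem_closed h0
        (fun y hy n hn => (hcl y hy n hn).resolve_right (by simp)) hr
    | p :: q' =>
      by_cases hp : p ∈ s
      · rw [show loopA g (fuel+1) s (p :: q') = loopA g fuel s q' by simp [loopA, hp]]
        refine ih s q' (by unfold muA at hmu ⊢; simp only [List.length_cons] at hmu; omega) hnd h0 hs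
          (fun x hx => hq x (by simp [hx])) ?_
        intro x hx n hn
        rcases hcl x hx n hn with h | h
        · exact Or.inl h
        · rcases List.mem_cons.mp h with rfl | h
          · exact Or.inl hp
          · exact Or.inr h
      · have hpS : p ∈ S := (hq p (by simp)).2
        have hget := goodSet_get?_some hS hpS
        rw [show loopA g (fuel+1) s (p :: q')
            = loopA g fuel (PySem.Set.add s p) (q' ++ nbrsD g p) by simp [loopA, hp, hget]]
        have hpR : Reaches g p := (hq p (by simp)).1
        refine ih (PySem.Set.add s p) (q' ++ nbrsD g p)
          (Nat.lt_of_lt_of_le (muA_step hget hp q') (Nat.lt_succ_iff.mp hmu))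
          (PySem.Set.nodup_add _ _ hnd) (by rw [PySem.Set.mem_add]; left; exact h0) ?_ ?_ ?_
        · intro x hx
          rcases (PySem.Set.mem_add _ _ _).mp hx with h | rfl
          · exact hs x h
          · exact ⟨hpR, hpS⟩
        · intro x hx
          rcases List.mem_append.mp hx with h | h
          · exact hq x (by simp [h])
          · exact ⟨Reaches.step p x hpR h, hS.2.2 p hpS x h⟩
        · intro x hx n hn
          rcases (PySem.Set.mem_add _ _ _).mp hx with h | rfl
          · rcases hcl x h n hn with h2 | h2
            · exact Or.inl (by rw [PySem.Set.mem_add]; left; exact h2)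
            · rcases List.mem_cons.mp h2 with rfl | h2
              · exact Or.inl (by rw [PySem.Set.mem_add]; right; rfl)
              · exact Or.inr (List.mem_append.mpr (Or.inl h2))
          · exact Or.inr (List.mem_append.mpr (Or.inr hn))

-- ---- addNew characterisation ----
theorem addNew_spec (ns : List Int) : ∀ (seen : PySem.Set Int) (nxt : List Int),
    seen.Nodup →
    (seen.Nodup → (addNew seen nxt ns).1.Nodup) ∧
    (∀ x, x ∈ (addNew seen nxt ns).1 ↔ x ∈ seen ∨ x ∈ ns) ∧
    (∀ x, x ∈ (addNew seen nxt ns).2 ↔ x ∈ nxt ∨ (x ∈ ns ∧ x ∉ seen)) := by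
  induction ns with
  | nil => intro seen nxt hnd; simp [addNew]
  | cons n ns ih =>
    intro seen nxt hnd
    by_cases hn : n ∈ seen
    · rw [show addNew seen nxt (n :: ns) = addNew seen nxt ns by simp [addNew, hn]]
      obtain ⟨i1, i2, i3⟩ := ih seen nxt hnd
      refine ⟨i1, fun x => ?_, fun x => ?_⟩
      · rw [i2 x]
        constructor
        · rintro (h | h)
          · exact Or.inl h
          · exact Or.inr (by simp [h])
        · rintro (h | h)
          · exact Or.inl h
          · rcases List.mem_cons.mp h with rfl | h
            · exact Or.inl hn
            · exact Or.inr h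
      · rw [i3 x]
        constructor
        · rintro (h | ⟨h1, h2⟩)
          · exact Or.inl h
          · exact Or.inr ⟨by simp [h1], h2⟩
        · rintro (h | ⟨h1, h2⟩)
          · exact Or.inl h
          · rcases List.mem_cons.mp h1 with rfl | h1
            · exact absurd hn h2
            · exact Or.inr ⟨h1, h2⟩
    · rw [show addNew seen nxt (n :: ns)
          = addNew (PySem.Set.add seen n) (nxt ++ [n]) ns by simp [addNew, hn]]
      obtain ⟨i1, i2, i3⟩ := ih (PySem.Set.add seen n) (nxt ++ [n]) (PySem.Set.nodup_add _ _ hnd)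
      refine ⟨fun _ => i1 (PySem.Set.nodup_add _ _ hnd), fun x => ?_, fun x => ?_⟩
      · rw [i2 x, PySem.Set.mem_add]
        constructor
        · rintro ((h | rfl) | h)
          · exact Or.inl h
          · exact Or.inr (by simp)
          · exact Or.inr (by simp [h])
        · rintro (h | h)
          · exact Or.inl (Or.inl h)
          · rcases List.mem_cons.mp h with rfl | h
            · exact Or.inl (Or.inr rfl)
            · exact Or.inr h
      · rw [i3 x, PySem.Set.mem_add]
        constructor
        · rintro (h | ⟨h1, h2⟩)
          · rcases List.mem_append.mp h with h | h
            · exact Or.inl h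
            · simp at h; subst h; exact Or.inr ⟨by simp, hn⟩
          · exact Or.inr ⟨by simp [h1], fun hm => h2 (Or.inl hm)⟩
        · rintro (h | ⟨h1, h2⟩)
          · exact Or.inl (List.mem_append.mpr (Or.inl h))
          · rcases List.mem_cons.mp h1 with rfl | h1
            · exact Or.inl (by simp)
            · by_cases hx : x = n
              · exact Or.inl (by simp [hx])
              · refine Or.inr ⟨h1, fun hm => ?_⟩
                rcases hm with h | h
                · exact h2 h
                · exact hx h

-- ---- expand (one whole frontier) ----
theorem expand_run {g : List (Int × List Int)} {S : List Int} (hS : GoodSet g S) :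
    ∀ (frontier : List Int) (seen : PySem.Set Int) (nxt : List Int),
    seen.Nodup →
    (∀ x ∈ frontier, x ∈ seen) →
    (∀ x ∈ seen, Reaches g x ∧ x ∈ S) →
    (∀ x ∈ nxt, x ∈ seen) →
    ∃ seen' nxt', expand g seen nxt frontier = some (seen', nxt') ∧
      seen'.Nodup ∧
      (∀ x ∈ seen, x ∈ seen') ∧
      (∀ x ∈ nxt, x ∈ nxt') ∧
      (∀ x ∈ seen', Reaches g x ∧ x ∈ S) ∧
      (∀ x ∈ seen', x ∈ seen ∨ x ∈ nxt') ∧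
      (∀ x ∈ nxt', x ∈ seen') ∧
      (∀ x ∈ nxt', x ∈ nxt ∨ x ∉ seen) ∧
      (∀ node ∈ frontier, ∀ n ∈ nbrsD g node, n ∈ seen') := by
  intro frontier
  induction frontier with
  | nil =>
    intro seen nxt hnd _ hseen hnxt
    exact ⟨seen, nxt, rfl, hnd, fun x h => h, fun x h => h, hseen,
      fun x h => Or.inl h, hnxt, fun x h => Or.inl h, by simp⟩
  | cons node rest ih =>
    intro seen nxt hnd hfr hseen hnxt
    have hnodeS : node ∈ S := (hseen node (hfr node (by simp))).2
    have hnodeR : Reaches g node := (hseen node (hfr node (by simp))).1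
    have hget := goodSet_get?_some hS hnodeS
    obtain ⟨a1, a2, a3⟩ := addNew_spec (nbrsD g node) seen nxt hnd
    set seen1 := (addNew seen nxt (nbrsD g node)).1 with hseen1
    set nxt1 := (addNew seen nxt (nbrsD g node)).2 with hnxt1
    have hstep : expand g seen nxt (node :: rest) = expand g seen1 nxt1 rest := by
      simp [expand, hget, ← hseen1, ← hnxt1]
    have hseen1R : ∀ x ∈ seen1, Reaches g x ∧ x ∈ S := by
      intro x hx
      rcases (a2 x).mp hx with h | h
      · exact hseen x h
      · exact ⟨Reaches.step node x hnodeR h, hS.2.2 node hnodeS x h⟩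
    have hnxt1s : ∀ x ∈ nxt1, x ∈ seen1 := by
      intro x hx
      rcases (a3 x).mp hx with h | ⟨h1, _⟩
      · exact (a2 x).mpr (Or.inl (hnxt x h))
      · exact (a2 x).mpr (Or.inr h1)
    obtain ⟨seen', nxt', heq, c1, c2, c3, c4, c5, c6, c7, c8⟩ :=
      ih seen1 nxt1 (a1 hnd)
        (fun x hx => (a2 x).mpr (Or.inl (hfr x (by simp [hx])))) hseen1R hnxt1s
    refine ⟨seen', nxt', hstep ▸ heq, c1,
      fun x hx => c2 x ((a2 x).mpr (Or.inl hx)),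
      fun x hx => c3 x ((a3 x).mpr (Or.inl hx)), c4, ?_, c6, ?_, ?_⟩
    · intro x hx
      rcases c5 x hx with h | h
      · rcases (a2 x).mp h with h | h
        · exact Or.inl h
        · by_cases hxs : x ∈ seen
          · exact Or.inl hxs
          · exact Or.inr (c3 x ((a3 x).mpr (Or.inr ⟨h, hxs⟩)))
      · exact Or.inr h
    · intro x hx
      rcases c7 x hx with h | h
      · rcases (a3 x).mp h with h | ⟨_, h2⟩
        · exact Or.inl h
        · exact Or.inr h2
      · exact Or.inr (fun hm => h ((a2 x).mpr (Or.inl hm)))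
    · intro nd hnd2 n hn
      rcases List.mem_cons.mp hnd2 with rfl | hnd2
      · exact c2 n ((a2 n).mpr (Or.inr hn))
      · exact c8 nd hnd2 n hn

-- ---- termination measure for B ----
def muB (g : List (Int × List Int)) (seen : PySem.Set Int) : Nat :=
  ((PySem.List.dedup (g.map Prod.fst)).filter (fun x => decide (x ∉ seen))).length

theorem muB_lt {g : List (Int × List Int)} {seen seen' : PySem.Set Int}
    (hsub : ∀ x ∈ seen, x ∈ seen') {w : Int} (hw1 : w ∈ seen') (hw2 : w ∉ seen)
    (hw3 : w ∈ g.map Prod.fst) : muB g seen' < muB g seen := by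
  have hsl : List.Sublist ((PySem.List.dedup (g.map Prod.fst)).filter (fun x => decide (x ∉ seen')))
      ((PySem.List.dedup (g.map Prod.fst)).filter (fun x => decide (x ∉ seen))) := by
    refine List.monotone_filter_right _ ?_
    intro a ha
    simp only [decide_eq_true_eq] at *
    exact fun hm => ha (hsub a hm)
  have hne : ((PySem.List.dedup (g.map Prod.fst)).filter (fun x => decide (x ∉ seen')))
      ≠ ((PySem.List.dedup (g.map Prod.fst)).filter (fun x => decide (x ∉ seen))) := by
    intro heq
    have hw : w ∈ (PySem.List.dedup (g.map Prod.fst)).filter (fun x => decide (x ∉ seen)) := by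
      rw [List.mem_filter]
      exact ⟨(PySem.List.mem_dedup _ _).mpr hw3, by simpa using hw2⟩
    rw [← heq, List.mem_filter] at hw
    simp only [decide_eq_true_eq] at hw
    exact hw.2 hw1
  have := hsl.length_le
  rcases Nat.lt_or_ge (muB g seen') (muB g seen) with h | h
  · exact h
  · exact absurd (hsl.eq_of_length (Nat.le_antisymm this h)) hne

-- ---- main loop lemma for B ----
theorem loopB_run {g : List (Int × List Int)} {S : List Int} (hS : GoodSet g S) :
    ∀ (fuel : Nat) (seen : PySem.Set Int) (frontier : List Int),
    muB g seen + 2 ≤ fuel →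
    seen.Nodup → 0 ∈ seen →
    (∀ x ∈ frontier, x ∈ seen) →
    (∀ x ∈ seen, Reaches g x ∧ x ∈ S) →
    (∀ x ∈ seen, x ∉ frontier → ∀ n ∈ nbrsD g x, n ∈ seen) →
    ∃ t, loopB g fuel seen frontier = some t ∧ t.Nodup ∧ ∀ x, x ∈ t ↔ Reaches g x := by
  intro fuel
  induction fuel with
  | zero => intro seen frontier hmu; omega
  | succ fuel ih =>
    intro seen frontier hmu hnd h0 hfr hseen hcl
    by_cases hemp : frontier = []
    · subst hemp
      rw [show loopB g (fuel+1) seen [] = some seen by simp [loopB]]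
      refine ⟨seen, rfl, hnd, fun x => ⟨fun hx => (hseen x hx).1, fun hr => ?_⟩⟩
      exact reaches_mem_closed h0 (fun y hy => hcl y hy (by simp)) hr
    · obtain ⟨seen', nxt', heq, c1, c2, c3, c4, c5, c6, c7, c8⟩ :=
        expand_run hS frontier seen [] hnd hfr hseen (by simp)
      rw [show loopB g (fuel+1) seen frontier = loopB g fuel seen' nxt' by
        simp [loopB, hemp, heq]]
      have hcl' : ∀ x ∈ seen', x ∉ nxt' → ∀ n ∈ nbrsD g x, n ∈ seen' := by
        intro x hx hnx n hn
        rcases c5 x hx with h | h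
        · by_cases hxf : x ∈ frontier
          · exact c8 x hxf n hn
          · exact c2 n (hcl x h hxf n hn)
        · exact absurd h hnx
      by_cases hemp2 : nxt' = []
      · subst hemp2
        have hf1 : 1 ≤ fuel := by omega
        match fuel, hf1 with
        | f+1, _ =>
          rw [show loopB g (f+1) seen' [] = some seen' by simp [loopB]]
          refine ⟨seen', rfl, c1, fun x => ⟨fun hx => (c4 x hx).1, fun hr => ?_⟩⟩
          exact reaches_mem_closed (c2 0 h0)
            (fun y hy => hcl' y hy (by simp)) hr
      · obtain ⟨w, hwmem⟩ := List.exists_mem_of_ne_nil nxt' hemp2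
        have hw1 : w ∈ seen' := c6 w hwmem
        have hw2 : w ∉ seen := by
          rcases c7 w hwmem with h | h
          · simp at h
          · exact h
        have hlt := muB_lt c2 hw1 hw2 (hS.1 w (c4 w hw1).2)
        exact ih seen' nxt' (by omega) c1 (c2 0 h0) c6 c4 hcl'

-- filter sum is at most the full sum (for fuelA sufficiency)
theorem muA_init_lt (g : List (Int × List Int)) (q0 : List Int)
    (h : PySem.Dict.get? (PySem.Dict.mk g) 0 = some q0) :
    muA g (PySem.Set.ofList [0]) q0 < fuelA g := by
  have hle : ((g.filter (fun kv => decide (kv.1 ∉ PySem.Set.ofList [0]))).map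
      (fun kv => 1 + kv.2.length)).sum ≤ (g.map (fun kv => 1 + kv.2.length)).sum :=
    List.Sublist.sum_le_sum (List.Sublist.map _ List.filter_sublist) (by simp)
  simp only [muA, fuelA, h, Option.getD_some]
  omega

-- ===== VERDICT (by name: the statement is the Claim_ definition above) =====
theorem solve_spec : Claim_equal_solve := by
  intro g _ hpre
  obtain ⟨S, hS⟩ := pre_goodSet hpre
  unfold Spec_solve solve solve_alt
  have hget := goodSet_get?_some hS hS.2.1
  have hAinit : ∀ x ∈ PySem.Set.ofList ([0] : List Int), Reaches g x ∧ x ∈ S := by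
    intro x hx
    rw [PySem.Set.mem_ofList] at hx
    simp at hx; subst hx
    exact ⟨Reaches.zero, hS.2.1⟩
  obtain ⟨tA, hA, hAnd, hAmem⟩ :=
    loopA_run hS (fuelA g) (PySem.Set.ofList [0]) (nbrsD g 0)
      (muA_init_lt g (nbrsD g 0) hget)
      (PySem.Set.nodup_ofList _) (by simp [PySem.Set.mem_ofList])
      hAinit
      (fun x hx => ⟨Reaches.step 0 x Reaches.zero hx, hS.2.2 0 hS.2.1 x hx⟩)
      (by
        intro x hx n hn
        rw [PySem.Set.mem_ofList] at hx
        simp at hx; subst hx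
        exact Or.inr hn)
  obtain ⟨tB, hB, hBnd, hBmem⟩ :=
    loopB_run hS (fuelB g) (PySem.Set.ofList [0]) [0]
      (by
        have : muB g (PySem.Set.ofList [0]) ≤ (PySem.List.dedup (g.map Prod.fst)).length :=
          List.Sublist.length_le List.filter_sublist
        simp only [fuelB]; omega)
      (PySem.Set.nodup_ofList _) (by simp [PySem.Set.mem_ofList])
      (by simp [PySem.Set.mem_ofList]) hAinit
      (by
        intro x hx hnx
        rw [PySem.Set.mem_ofList] at hx
        simp at hx; subst hx
        simp at hnx)
  have : tA.length = tB.length :=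
    ((List.perm_ext_iff_of_nodup hAnd hBnd).mpr (fun x => (hAmem x).trans (hBmem x).symm)).length_eq
  simp only [hget, hA, hB, this]
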